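-- pv_equiv track=rewrite | github.com/Sierraki/Solutions | Leetcode/算法&Algorithm/周赛/168双周赛/Q1.反转后字典序最小的字符串.py | lexSmallest
-- ===== SOURCE A (Python) =====
-- def lexSmallest(s: str) -> str:
--     ans = s
--     for i in range(len(s)):
--         p1 = s[: i + 1]
--         p2 = s[i + 1 :]
--         res1 = p1[::-1] + p2
--         res2 = p1 + p2[::-1]
--         ans = min(ans, res1, res2)
--     return ans
-- ===== SOURCE B (Python) =====
-- def lexSmallest(s: str) -> str:
--     # Single left-to-right sweep maintaining the prefix and its reversal as
--     # growing accumulators, so the prefix is never re-sliced or re-reversed.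
--     best = s
--     pref = ''
--     revpref = ''
--     rest = s
--     for c in s:
--         rest = rest[1:]
--         pref = pref + c
--         revpref = c + revpref
--         cand1 = revpref + rest
--         cand2 = pref + rest[::-1]
--         if cand1 < best:
--             best = cand1
--         if cand2 < best:
--             best = cand2
--     return best
-- ===== Notes on version B (the rewrite author's own statement) =====
-- stated objective: alternative
-- what changed: Replaces A's index loop that re-slices and re-reverses the prefix/suffix at every position with a single sweep that maintains the prefix and its reversal as growing accumulators and updates the best candidate with explicit comparisons.
import Mathlib
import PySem

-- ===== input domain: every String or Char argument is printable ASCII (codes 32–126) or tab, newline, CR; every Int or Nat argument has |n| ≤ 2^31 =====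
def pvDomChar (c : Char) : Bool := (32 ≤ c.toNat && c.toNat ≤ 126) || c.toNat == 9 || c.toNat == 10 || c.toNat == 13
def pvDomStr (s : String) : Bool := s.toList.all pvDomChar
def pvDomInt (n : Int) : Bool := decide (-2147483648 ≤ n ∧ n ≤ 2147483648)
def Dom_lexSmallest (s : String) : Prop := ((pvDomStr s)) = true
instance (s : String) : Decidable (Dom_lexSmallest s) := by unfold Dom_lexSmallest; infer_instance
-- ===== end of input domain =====

-- B replaces A's per-index slicing/reversal by one sweep with prefix accumulators; same O(n^2) cost, different structure.

-- ===== PORT A =====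
-- min(ans, res1, res2): Python keeps the current value and replaces it only on strict '<'.
def pyMin3A (a b c : List Char) : List Char :=
  let m := if b < a then b else a
  if c < m then c else m

def lexSmallest (s : String) : String :=
  let cs := s.toList
  let ans := (PySem.List.pyRange 0 (cs.length : Int) 1).foldl (fun ans i =>
    let p1 := PySem.List.slice cs none (some (i + 1))
    let p2 := PySem.List.slice cs (some (i + 1)) none
    let res1 := p1.reverse ++ p2   -- p1[::-1] is exactly reverse (PySem.List.slice?_none_none_neg_one)
    let res2 := p1 ++ p2.reverse   -- p2[::-1]
    pyMin3A ans res1 res2) cs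
  String.ofList ans

-- ===== PORT B =====
-- the two 'if cand < best' updates of Source B
def updB (best cand : List Char) : List Char := if cand < best then cand else best

-- one iteration of Source B's for-loop over the state (best, pref, revpref, rest)
def stepB (st : List Char × List Char × List Char × List Char) (c : Char) :
    List Char × List Char × List Char × List Char :=
  let (best, pref, revpref, rest) := st
  let rest' := PySem.List.slice rest (some 1) none   -- rest[1:]
  let pref' := pref ++ [c]                           -- pref + c
  let revpref' := c :: revpref                       -- c + revpref
  let cand1 := revpref' ++ rest'
  let cand2 := pref' ++ rest'.reverse                -- rest[::-1] is reverse (PySem.List.slice?_none_none_neg_one)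
  (updB (updB best cand1) cand2, pref', revpref', rest')

def lexSmallest_alt (s : String) : String :=
  let st := s.toList.foldl stepB (s.toList, [], [], s.toList)
  String.ofList st.1

-- ===== PRECONDITION & SPEC =====
def Spec_lexSmallest (s : String) (out : String) : Prop := out = lexSmallest_alt s
instance (s : String) (out : String) : Decidable (Spec_lexSmallest s out) := by unfold Spec_lexSmallest; infer_instance

-- ===== CLAIM (what is proved, stated in full; the proofs are below) =====
def Claim_equal_lexSmallest : Prop := ∀ (s : String), Dom_lexSmallest s → Spec_lexSmallest s (lexSmallest s)

-- ===== LEMMAS AND PROOFS =====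

-- the two update chains compute the same 3-way minimum
theorem updB_updB_eq_pyMin3A (a b c : List Char) :
    updB (updB a b) c = pyMin3A a b c := by
  unfold updB pyMin3A
  by_cases h1 : b < a <;> by_cases h2 : c < b <;> by_cases h3 : c < a <;>
    simp [h1, h2, h3]

-- A's fold from index k onward equals B's sweep with the first k chars already consumed
theorem loopA_eq_foldB (cs : List Char) :
    ∀ (m k : Nat) (best : List Char), cs.length - k = m →
      (PySem.List.pyRange (k : Int) (cs.length : Int) 1).foldl (fun ans i =>
        pyMin3A ans
          ((PySem.List.slice cs none (some (i + 1))).reverse ++ PySem.List.slice cs (some (i + 1)) none)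
          (PySem.List.slice cs none (some (i + 1)) ++ (PySem.List.slice cs (some (i + 1)) none).reverse)) best
      = ((cs.drop k).foldl stepB (best, cs.take k, (cs.take k).reverse, cs.drop k)).1 := by
  intro m
  induction m with
  | zero =>
    intro k best hm
    have hk : cs.length ≤ k := by omega
    rw [PySem.List.pyRange_one_eq_nil (by exact_mod_cast hk)]
    simp [List.drop_eq_nil_of_le hk]
  | succ m ih =>
    intro k best hm
    have hk : k < cs.length := by omega
    rw [PySem.List.pyRange_one_cons (by exact_mod_cast hk)]
    simp only [List.foldl_cons]
    have h1 : (k : Int) + 1 = ((k + 1 : Nat) : Int) := by push_cast; ring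
    rw [h1, PySem.List.slice_to_natCast, PySem.List.slice_from_natCast]
    have hdrop : cs.drop k = cs[k] :: cs.drop (k + 1) := List.drop_eq_getElem_cons hk
    have htake : cs.take (k + 1) = cs.take k ++ [cs[k]] := by
      rw [List.take_add_one]
      simp [List.getElem?_eq_getElem hk]
    have hrev : (cs.take (k + 1)).reverse = cs[k] :: (cs.take k).reverse := by
      rw [htake]; simp
    rw [ih (k + 1)
      (pyMin3A best ((cs.take (k + 1)).reverse ++ cs.drop (k + 1))
        (cs.take (k + 1) ++ (cs.drop (k + 1)).reverse)) (by omega)]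
    conv_rhs => rw [hdrop]
    simp only [List.foldl_cons, stepB, PySem.List.slice_from_one, List.tail_cons,
      updB_updB_eq_pyMin3A, ← htake, ← hrev]

-- ===== VERDICT (by name: the statement is the Claim_ definition above) =====
theorem lexSmallest_spec : Claim_equal_lexSmallest := by
  intro s _
  unfold Spec_lexSmallest lexSmallest lexSmallest_alt
  have h := loopA_eq_foldB s.toList (s.toList.length) 0 s.toList (by omega)
  simpa using congrArg String.ofList h
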